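-- pv_equiv track=rewrite | github.com/pomneii/BplusTree-Project-OODs | Sorting/somethingDROME.py | custome_sort
-- ===== SOURCE A (Python) =====
-- def custome_sort(inp) :
--     num_str = str(inp)
--     num_list = list(num_str)
--
--     def is_sorted_ascending(lst) :
--         return all(lst[i] <= lst[i + 1] for i in range(len(lst) - 1))
--
--     def is_sorted_descending(lst) :
--         return all(lst[i] >= lst[i + 1] for i in range(len(lst) - 1))
--
--     def has_duplicate(lst) :
--         return len(lst) != len(set(lst))
--
--     def all_same(lst) :
--         return len(set(lst)) == 1
--
--     if all_same(num_list) :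
--         return f"Repdrome"
--     elif is_sorted_ascending(num_list) :
--         if has_duplicate(num_list) :
--             return f"Plaindrome"
--         else :
--             return f"Metadrome"
--     elif is_sorted_descending(num_list) :
--         if has_duplicate(num_list) :
--             return f"Nialpdrome"
--         else :
--             return f"Katadrome"
--     else :
--         return f"Nondrome"
-- ===== SOURCE B (Python) =====
-- def custome_sort(inp):
--     s = str(inp)
--     has_less = has_greater = has_equal = False
--     for a, b in zip(s, s[1:]):
--         if a < b:
--             has_less = True
--         elif a > b:
--             has_greater = True
--         else:
--             has_equal = True
--     if has_less and has_greater: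
--         return "Nondrome"
--     if has_less:
--         return "Plaindrome" if has_equal else "Metadrome"
--     if has_greater:
--         return "Nialpdrome" if has_equal else "Katadrome"
--     return "Repdrome"
-- ===== Notes on version B (the rewrite author's own statement) =====
-- stated objective: alternative
-- what changed: Replaced A's four whole-list scans (index-based ascending and descending checks plus two set() constructions for the duplicate and all-same tests) by a single pass over adjacent character pairs maintaining three booleans (has_less, has_greater, has_equal) and classifying purely from the flags.
import Mathlib
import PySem

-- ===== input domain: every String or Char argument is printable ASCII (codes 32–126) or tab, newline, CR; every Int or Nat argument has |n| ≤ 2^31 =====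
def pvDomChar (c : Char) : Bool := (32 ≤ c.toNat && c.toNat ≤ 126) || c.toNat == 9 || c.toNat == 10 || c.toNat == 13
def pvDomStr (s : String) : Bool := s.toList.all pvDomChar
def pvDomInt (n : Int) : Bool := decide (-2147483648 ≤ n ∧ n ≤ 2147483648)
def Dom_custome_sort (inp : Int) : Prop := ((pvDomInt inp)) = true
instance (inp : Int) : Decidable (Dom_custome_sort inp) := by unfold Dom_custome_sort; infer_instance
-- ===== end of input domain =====

-- B replaces A's four whole-list scans (two index-based sortedness scans and two set() builds)
-- by a single pass over adjacent digit pairs maintaining three flags (objective: alternative,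
-- one-pass decomposition; no set construction).

-- ===== PORT A =====
-- helper is_sorted_ascending: all(lst[i] <= lst[i+1] for i in range(len(lst)-1));
-- indices i, i+1 are always in range, so the total pyGetD (default never used) is exact
def pvIsSortedAscending (lst : List Char) : Bool :=
  (PySem.List.pyRange 0 (PySem.List.len lst - 1) 1).all
    (fun i => decide (PySem.List.pyGetD lst i ' ' ≤ PySem.List.pyGetD lst (i + 1) ' '))

-- helper is_sorted_descending
def pvIsSortedDescending (lst : List Char) : Bool :=
  (PySem.List.pyRange 0 (PySem.List.len lst - 1) 1).all
    (fun i => decide (PySem.List.pyGetD lst (i + 1) ' ' ≤ PySem.List.pyGetD lst i ' '))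

-- helper has_duplicate: len(lst) != len(set(lst))
def pvHasDuplicate (lst : List Char) : Bool :=
  !(PySem.List.len lst == PySem.List.len (PySem.Set.ofList lst))

-- helper all_same: len(set(lst)) == 1
def pvAllSame (lst : List Char) : Bool :=
  PySem.List.len (PySem.Set.ofList lst) == 1

def custome_sort (inp : Int) : String :=
  let numList := PySem.Int.toChars inp   -- list(str(inp))
  if pvAllSame numList then "Repdrome"
  else if pvIsSortedAscending numList then
    (if pvHasDuplicate numList then "Plaindrome" else "Metadrome")
  else if pvIsSortedDescending numList then
    (if pvHasDuplicate numList then "Nialpdrome" else "Katadrome")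
  else "Nondrome"

-- ===== PORT B =====
-- the flag-collecting loop: for a, b in zip(s, s[1:]): ...
def pvFlags (s : List Char) : Bool × Bool × Bool :=
  (s.zip (s.drop 1)).foldl
    (fun f ab =>
      if ab.1 < ab.2 then (true, f.2.1, f.2.2)
      else if ab.2 < ab.1 then (f.1, true, f.2.2)
      else (f.1, f.2.1, true))
    (false, false, false)

def custome_sort_alt (inp : Int) : String :=
  let f := pvFlags (PySem.Int.toChars inp)   -- str(inp), one pass
  if f.1 && f.2.1 then "Nondrome"
  else if f.1 then (if f.2.2 then "Plaindrome" else "Metadrome")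
  else if f.2.1 then (if f.2.2 then "Nialpdrome" else "Katadrome")
  else "Repdrome"

-- ===== PRECONDITION & SPEC =====
def Spec_custome_sort (inp : Int) (out : String) : Prop := out = custome_sort_alt inp
instance (inp : Int) (out : String) : Decidable (Spec_custome_sort inp out) := by unfold Spec_custome_sort; infer_instance

-- ===== CLAIM (what is proved, stated in full; the proofs are below) =====
def Claim_equal_custome_sort : Prop := ∀ (inp : Int), Dom_custome_sort inp → Spec_custome_sort inp (custome_sort inp)

-- ===== LEMMAS AND PROOFS =====

theorem pv_toDigitsCore_ne_nil (b : Nat) : ∀ (f n : Nat) (l : List Char),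
    0 < f ∨ l ≠ [] → Nat.toDigitsCore b f n l ≠ [] := by
  intro f
  induction f with
  | zero => intro n l h; simp [Nat.toDigitsCore]; tauto
  | succ f ih =>
    intro n l _
    simp only [Nat.toDigitsCore]
    split
    · simp
    · exact ih _ _ (Or.inr (by simp))

theorem pv_toChars_ne_nil (n : Int) : PySem.Int.toChars n ≠ [] := by
  unfold PySem.Int.toChars
  split
  · simp
  · exact pv_toDigitsCore_ne_nil 10 _ _ [] (Or.inl (by omega))

-- the three flags computed by pvFlags are the three 'any adjacent pair' tests
theorem pvFlags_eq_any (pairs : List (Char × Char)) : ∀ (x y z : Bool),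
    pairs.foldl
      (fun f ab =>
        if ab.1 < ab.2 then (true, f.2.1, f.2.2)
        else if ab.2 < ab.1 then (f.1, true, f.2.2)
        else (f.1, f.2.1, true))
      (x, y, z)
    = (x || pairs.any (fun p => decide (p.1 < p.2)),
       y || pairs.any (fun p => decide (p.2 < p.1)),
       z || pairs.any (fun p => !(decide (p.1 < p.2)) && !(decide (p.2 < p.1)))) := by
  induction pairs with
  | nil => simp
  | cons p t ih =>
    intro x y z
    by_cases h1 : p.1 < p.2
    · have h2 : ¬ p.2 < p.1 := lt_asymm h1
      simp [List.foldl_cons, h1, h2, ih]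
    · by_cases h2 : p.2 < p.1
      · simp [List.foldl_cons, h1, h2, ih]
      · simp [List.foldl_cons, h1, h2, ih]

-- A's index-based adjacent-pair scan is the scan over zip(l, l[1:])
theorem pv_range_scan_eq_zip (P : Char → Char → Bool) : ∀ (l : List Char),
    (PySem.List.pyRange 0 (PySem.List.len l - 1) 1).all
      (fun i => P (PySem.List.pyGetD l i ' ') (PySem.List.pyGetD l (i + 1) ' '))
    = (l.zip (l.drop 1)).all (fun p => P p.1 p.2) := by
  have key : ∀ (l : List Char),
      (List.range (l.length - 1)).all (fun k => P (l.getD k ' ') (l.getD (k + 1) ' '))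
      = (l.zip (l.drop 1)).all (fun p => P p.1 p.2) := by
    intro l
    induction l with
    | nil => simp
    | cons a t ih =>
      cases t with
      | nil => simp
      | cons b t2 =>
        have hlen : (a :: b :: t2).length - 1 = (b :: t2).length - 1 + 1 := by
          simp [List.length_cons]
        rw [hlen, List.range_succ_eq_map]
        simp only [List.all_cons, List.all_map]
        have : ((List.range ((b :: t2).length - 1)).all
            (fun k => P ((a :: b :: t2).getD (k + 1) ' ') ((a :: b :: t2).getD (k + 1 + 1) ' ')))
            = ((List.range ((b :: t2).length - 1)).all
            (fun k => P ((b :: t2).getD k ' ') ((b :: t2).getD (k + 1) ' '))) := by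
          simp
        simp only [Function.comp_def, Nat.succ_eq_add_one, this, ih]
        simp [List.zip]
  intro l
  rw [PySem.List.pyRange_one]
  have hcast : ((PySem.List.len l - 1 - 0).toNat) = l.length - 1 := by
    simp [PySem.List.len_eq]
  rw [hcast, List.all_map]
  refine Eq.trans (List.all_congr rfl ?_) (key l)
  intro k
  have h2 : ((k : Int) + 1) = ((k + 1 : Nat) : Int) := by push_cast; ring
  simp only [Function.comp_def, zero_add, h2, PySem.List.pyGetD_natCast]

-- length of the Python set = card of the finset of elements
theorem pv_ofList_length_eq_card (l : List Char) :
    (PySem.Set.ofList l).length = l.toFinset.card := by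
  have hfe : (PySem.Set.ofList l).toFinset = l.toFinset := by
    ext x; simp [List.mem_toFinset, PySem.Set.mem_ofList]
  calc (PySem.Set.ofList l).length
      = (PySem.Set.ofList l).toFinset.card :=
        (List.toFinset_card_of_nodup (PySem.Set.nodup_ofList l)).symm
    _ = l.toFinset.card := by rw [hfe]

theorem pv_card_eq_length_iff_nodup (l : List Char) :
    l.toFinset.card = l.length ↔ l.Nodup := by
  constructor
  · intro h
    have h1 : l.toFinset = l.dedup.toFinset := by
      ext x; simp [List.mem_toFinset, List.mem_dedup]
    have h2 : l.dedup.length = l.length := by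
      rw [← List.toFinset_card_of_nodup (List.nodup_dedup l), ← h1, h]
    have := (List.dedup_sublist l).eq_of_length h2
    rw [← this]; exact List.nodup_dedup l
  · exact List.toFinset_card_of_nodup

-- ∀-over-adjacent-pairs is IsChain
theorem pv_zip_forall_iff_isChain (R : Char → Char → Prop) : ∀ (l : List Char),
    (∀ p ∈ l.zip (l.drop 1), R p.1 p.2) ↔ List.IsChain R l := by
  intro l
  induction l with
  | nil => simp
  | cons a t ih =>
    cases t with
    | nil => simp
    | cons b t2 =>
      rw [List.isChain_cons_cons, ← ih]
      constructor
      · intro h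
        exact ⟨h (a, b) (by simp [List.zip]), fun p hp => h p (by simp [List.zip]; right; simpa [List.zip] using hp)⟩
      · rintro ⟨hab, h⟩ p hp
        simp only [List.zip, List.drop_succ_cons, List.drop_zero, List.zipWith_cons_cons,
          List.mem_cons] at hp
        rcases hp with h1 | h2
        · subst h1; exact hab
        · exact h p (by simpa [List.zip] using h2)

-- an adjacent equal pair is a duplicate
theorem pv_adj_eq_not_nodup : ∀ (l : List Char),
    (∃ p ∈ l.zip (l.drop 1), p.1 = p.2) → ¬ l.Nodup := by
  intro l
  induction l with
  | nil => simp
  | cons a t ih =>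
    cases t with
    | nil => simp
    | cons b t2 =>
      rintro ⟨p, hp, hpe⟩ hnd
      simp only [List.zip, List.drop_succ_cons, List.drop_zero, List.zipWith_cons_cons,
        List.mem_cons] at hp
      rcases hp with h1 | h2
      · rw [h1] at hpe; simp at hpe
        subst hpe
        exact (List.nodup_cons.mp hnd).1 (by simp)
      · exact ih ⟨p, by simpa [List.zip] using h2, hpe⟩ (List.Nodup.of_cons hnd)

-- duplicates in a monotone (adjacently ≤ or adjacently ≥) list are exactly adjacent equal pairs
theorem pv_nodup_of_mono_no_eq (l : List Char)
    (hmono : (∀ p ∈ l.zip (l.drop 1), p.1 ≤ p.2) ∨ (∀ p ∈ l.zip (l.drop 1), p.2 ≤ p.1))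
    (hne : ¬ ∃ p ∈ l.zip (l.drop 1), p.1 = p.2) : l.Nodup := by
  simp only [not_exists, not_and] at hne
  rcases hmono with h | h
  · have hch : List.IsChain (· < ·) l :=
      (pv_zip_forall_iff_isChain _ l).mp (fun p hp => lt_of_le_of_ne (h p hp) (hne p hp))
    exact (List.isChain_iff_pairwise.mp hch).imp ne_of_lt
  · haveI : Trans (fun a b : Char => b < a) (fun a b : Char => b < a) (fun a b : Char => b < a) :=
      ⟨fun h1 h2 => lt_trans h2 h1⟩
    have hch : List.IsChain (fun a b : Char => b < a) l :=
      (pv_zip_forall_iff_isChain _ l).mp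
        (fun p hp => lt_of_le_of_ne (h p hp) (fun he => hne p hp he.symm))
    exact (List.isChain_iff_pairwise.mp hch).imp (fun h => ne_of_gt h)

-- the heart of the equivalence: on any nonempty digit list the two classifications agree
theorem pv_classify_eq (l : List Char) (hl : l ≠ []) :
    (if pvAllSame l then "Repdrome"
     else if pvIsSortedAscending l then
       (if pvHasDuplicate l then "Plaindrome" else "Metadrome")
     else if pvIsSortedDescending l then
       (if pvHasDuplicate l then "Nialpdrome" else "Katadrome")
     else "Nondrome")
    = (let f := pvFlags l
       if f.1 && f.2.1 then "Nondrome"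
       else if f.1 then (if f.2.2 then "Plaindrome" else "Metadrome")
       else if f.2.1 then (if f.2.2 then "Nialpdrome" else "Katadrome")
       else "Repdrome") := by
  obtain ⟨c, t, rfl⟩ : ∃ c t, l = c :: t := by
    cases l with
    | nil => exact absurd rfl hl
    | cons c t => exact ⟨c, t, rfl⟩
  set l := c :: t with hldef
  set pairs := l.zip (l.drop 1) with hpairs
  have hflags : pvFlags l = (pairs.any (fun p => decide (p.1 < p.2)),
      pairs.any (fun p => decide (p.2 < p.1)),
      pairs.any (fun p => !(decide (p.1 < p.2)) && !(decide (p.2 < p.1)))) := by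
    rw [pvFlags, ← hpairs, pvFlags_eq_any]
    simp
  -- boolean characterisations of the three flags
  have bL : (pvFlags l).1 = true ↔ ∃ p ∈ pairs, p.1 < p.2 := by
    rw [hflags]; simp [List.any_eq_true]
  have bG : (pvFlags l).2.1 = true ↔ ∃ p ∈ pairs, p.2 < p.1 := by
    rw [hflags]; simp [List.any_eq_true]
  have bE : (pvFlags l).2.2 = true ↔ ∃ p ∈ pairs, p.1 = p.2 := by
    rw [hflags]; simp only [List.any_eq_true]
    constructor
    · rintro ⟨p, hp, h⟩
      refine ⟨p, hp, ?_⟩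
      simp only [Bool.and_eq_true, Bool.not_eq_true', decide_eq_false_iff_not, not_lt] at h
      exact le_antisymm h.2 h.1
    · rintro ⟨p, hp, h⟩
      exact ⟨p, hp, by simp [h]⟩
  -- boolean characterisations of A's four tests
  have bAsc : pvIsSortedAscending l = true ↔ ¬ ∃ p ∈ pairs, p.2 < p.1 := by
    rw [pvIsSortedAscending, pv_range_scan_eq_zip (fun a b => decide (a ≤ b)) l, ← hpairs]
    simp only [List.all_eq_true, decide_eq_true_eq, not_exists]
    exact ⟨fun h p hc => absurd (h p hc.1) (not_le.mpr hc.2),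
           fun h p hp => not_lt.mp (fun hc => h p ⟨hp, hc⟩)⟩
  have bDesc : pvIsSortedDescending l = true ↔ ¬ ∃ p ∈ pairs, p.1 < p.2 := by
    rw [pvIsSortedDescending, pv_range_scan_eq_zip (fun a b => decide (b ≤ a)) l, ← hpairs]
    simp only [List.all_eq_true, decide_eq_true_eq, not_exists]
    exact ⟨fun h p hc => absurd (h p hc.1) (not_le.mpr hc.2),
           fun h p hp => not_lt.mp (fun hc => h p ⟨hp, hc⟩)⟩
  have hlenIff : (PySem.List.len l = PySem.List.len (PySem.Set.ofList l)) ↔ l.Nodup := by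
    simp only [PySem.List.len_eq, Nat.cast_inj]
    rw [pv_ofList_length_eq_card]
    constructor
    · intro h; exact (pv_card_eq_length_iff_nodup l).mp h.symm
    · intro h; exact (List.toFinset_card_of_nodup h).symm
  have bDup : pvHasDuplicate l = true ↔ ¬ l.Nodup := by
    rw [pvHasDuplicate]
    simp only [Bool.not_eq_true', beq_eq_false_iff_ne, ne_eq]
    exact not_congr hlenIff
  have bSame : pvAllSame l = true ↔ ∀ p ∈ pairs, p.1 = p.2 := by
    rw [pvAllSame]
    simp only [beq_iff_eq, PySem.List.len_eq, Nat.cast_eq_one]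
    rw [pv_ofList_length_eq_card, Finset.card_eq_one]
    constructor
    · rintro ⟨a, ha⟩ p hp
      have h1 := (List.of_mem_zip hp).1
      have h2 := List.mem_of_mem_drop (List.of_mem_zip hp).2
      have e1 : p.1 = a := by
        have : p.1 ∈ l.toFinset := List.mem_toFinset.mpr h1
        rw [ha] at this; simpa using this
      have e2 : p.2 = a := by
        have : p.2 ∈ l.toFinset := List.mem_toFinset.mpr h2
        rw [ha] at this; simpa using this
      rw [e1, e2]
    · intro h
      refine ⟨c, ?_⟩
      have hall : ∀ x ∈ l, x = c := by
        have hch : List.IsChain (fun a b : Char => a = b) l :=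
          (pv_zip_forall_iff_isChain _ l).mp h
        have hpw : List.Pairwise (fun a b : Char => a = b) l :=
          List.isChain_iff_pairwise.mp hch
        rw [hldef, List.pairwise_cons] at hpw
        intro x hx
        rw [hldef, List.mem_cons] at hx
        rcases hx with rfl | hx
        · rfl
        · exact (hpw.1 x hx).symm
      ext x
      simp only [List.mem_toFinset, Finset.mem_singleton]
      exact ⟨fun hx => hall x hx, fun hx => by rw [hx]; exact (by rw [hldef]; simp)⟩
  -- case split on the two strict flags
  by_cases hL : ∃ p ∈ pairs, p.1 < p.2 <;> by_cases hG : ∃ p ∈ pairs, p.2 < p.1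
  · -- both directions occur: Nondrome on both sides
    have hS : pvAllSame l = false := by
      rw [Bool.eq_false_iff]
      intro h
      obtain ⟨p, hp, hlt⟩ := hL
      exact absurd (bSame.mp h p hp) (ne_of_lt hlt)
    have hA : pvIsSortedAscending l = false := by
      rw [Bool.eq_false_iff]; intro h; exact (bAsc.mp h) hG
    have hD : pvIsSortedDescending l = false := by
      rw [Bool.eq_false_iff]; intro h; exact (bDesc.mp h) hL
    simp [hS, hA, hD, bL.mpr hL, bG.mpr hG]
  · -- strictly ascending somewhere, never descending
    have hS : pvAllSame l = false := by
      rw [Bool.eq_false_iff]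
      intro h
      obtain ⟨p, hp, hlt⟩ := hL
      exact absurd (bSame.mp h p hp) (ne_of_lt hlt)
    have hA : pvIsSortedAscending l = true := bAsc.mpr hG
    have hGf : (pvFlags l).2.1 = false := by
      rw [Bool.eq_false_iff]; intro h; exact hG (bG.mp h)
    have hDupE : pvHasDuplicate l = (pvFlags l).2.2 := by
      by_cases hE : ∃ p ∈ pairs, p.1 = p.2
      · rw [bE.mpr hE, bDup.mpr (pv_adj_eq_not_nodup l hE)]
      · have hnd : l.Nodup := by
          refine pv_nodup_of_mono_no_eq l (Or.inl ?_) hE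
          intro p hp
          rcases lt_trichotomy p.1 p.2 with h | h | h
          · exact le_of_lt h
          · exact le_of_eq h
          · exact absurd ⟨p, hp, h⟩ hG
        have h1 : pvHasDuplicate l = false := by
          rw [Bool.eq_false_iff]; intro h; exact (bDup.mp h) hnd
        have h2 : (pvFlags l).2.2 = false := by
          rw [Bool.eq_false_iff]; intro h; exact hE (bE.mp h)
        rw [h1, h2]
    simp [hS, hA, bL.mpr hL, hGf, hDupE]
  · -- strictly descending somewhere, never ascending
    have hS : pvAllSame l = false := by
      rw [Bool.eq_false_iff]
      intro h
      obtain ⟨p, hp, hlt⟩ := hG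
      exact absurd (bSame.mp h p hp).symm (ne_of_lt hlt)
    have hA : pvIsSortedAscending l = false := by
      rw [Bool.eq_false_iff]; intro h; exact (bAsc.mp h) hG
    have hD : pvIsSortedDescending l = true := bDesc.mpr hL
    have hLf : (pvFlags l).1 = false := by
      rw [Bool.eq_false_iff]; intro h; exact hL (bL.mp h)
    have hDupE : pvHasDuplicate l = (pvFlags l).2.2 := by
      by_cases hE : ∃ p ∈ pairs, p.1 = p.2
      · rw [bE.mpr hE, bDup.mpr (pv_adj_eq_not_nodup l hE)]
      · have hnd : l.Nodup := by
          refine pv_nodup_of_mono_no_eq l (Or.inr ?_) hE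
          intro p hp
          rcases lt_trichotomy p.2 p.1 with h | h | h
          · exact le_of_lt h
          · exact le_of_eq h
          · exact absurd ⟨p, hp, h⟩ hL
        have h1 : pvHasDuplicate l = false := by
          rw [Bool.eq_false_iff]; intro h; exact (bDup.mp h) hnd
        have h2 : (pvFlags l).2.2 = false := by
          rw [Bool.eq_false_iff]; intro h; exact hE (bE.mp h)
        rw [h1, h2]
    simp [hS, hA, hD, hLf, bG.mpr hG, hDupE]
  · -- no strict pair at all: all digits equal, Repdrome on both sides
    have hS : pvAllSame l = true := by
      refine bSame.mpr ?_
      intro p hp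
      rcases lt_trichotomy p.1 p.2 with h | h | h
      · exact absurd ⟨p, hp, h⟩ hL
      · exact h
      · exact absurd ⟨p, hp, h⟩ hG
    have hLf : (pvFlags l).1 = false := by
      rw [Bool.eq_false_iff]; intro h; exact hL (bL.mp h)
    have hGf : (pvFlags l).2.1 = false := by
      rw [Bool.eq_false_iff]; intro h; exact hG (bG.mp h)
    simp [hS, hLf, hGf]

-- ===== VERDICT (by name: the statement is the Claim_ definition above) =====
theorem custome_sort_spec : Claim_equal_custome_sort := by
  intro inp _
  unfold Spec_custome_sort custome_sort custome_sort_alt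
  exact pv_classify_eq _ (pv_toChars_ne_nil inp)
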